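-- pv_equiv track=rewrite | github.com/ezechiana/qrma-report-engine | app/services/product_resolver.py | _link_priority_map
-- ===== SOURCE A (Python) =====
-- from typing import Any, Dict, List, Set, Tuple
--
-- def _link_priority_map(links: List[Dict[str, Any]]) -> Dict[str, int]:
--     out: Dict[str, int] = {}
--     for item in links or []:
--         name = (item.get("name") or "").strip()
--         priority = int(item.get("priority", 99) or 99)
--         if not name:
--             continue
--         if name not in out or priority < out[name]:
--             out[name] = priority
--     return out
-- ===== SOURCE B (Python) =====
-- def _link_priority_map(links):
--     # Staged pipeline: normalize everything, filter named, dedup names, then min per name.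
--     pairs = [((item.get("name") or "").strip(), int(item.get("priority", 99) or 99))
--              for item in (links or [])]
--     named = [(n, p) for n, p in pairs if n]
--     order = list(dict.fromkeys(n for n, _ in named))
--     return {n: min(p for m, p in named if m == n) for n in order}
-- ===== Notes on version B (the rewrite author's own statement) =====
-- stated objective: alternative
-- what changed: Replaces A's single-pass dict with running-minimum conditional updates by a staged list pipeline with no incrementally-updated dict: normalize all items to (name,priority) pairs, filter out empty names, dedup names in first-encounter order, then take min over the filtered pairs per name.
import Mathlib
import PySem

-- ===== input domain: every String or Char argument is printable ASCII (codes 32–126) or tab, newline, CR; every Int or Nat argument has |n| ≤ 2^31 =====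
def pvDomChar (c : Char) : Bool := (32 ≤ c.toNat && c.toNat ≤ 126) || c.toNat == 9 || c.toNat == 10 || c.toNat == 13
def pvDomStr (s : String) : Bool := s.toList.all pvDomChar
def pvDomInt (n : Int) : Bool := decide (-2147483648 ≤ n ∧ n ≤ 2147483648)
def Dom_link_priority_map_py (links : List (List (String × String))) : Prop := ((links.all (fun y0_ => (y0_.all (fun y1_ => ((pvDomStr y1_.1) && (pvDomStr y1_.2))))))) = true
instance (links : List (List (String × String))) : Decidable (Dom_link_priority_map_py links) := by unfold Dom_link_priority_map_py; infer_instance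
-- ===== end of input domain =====

-- B replaces A's dict with running-minimum conditional updates by a staged list pipeline
-- (normalize all, filter named, dedup names, min per name) — alternative decomposition.

-- ===== PORT A =====
-- item.get("name") or "" : the only falsy str is "", so this is getD "name" "" (exact).
-- int(item.get("priority", 99) or 99): missing key or "" gives 99, else int(v); int(v) raises
-- ValueError exactly where PySem.Int.ofStr? v = none — those inputs are excluded by Pre_ below
-- (the .getD 0 arm is never reached inside Pre_).
def link_priority_map_py (links : List (List (String × String))) : List (String × Int) :=
  (links.foldl (fun (out : PySem.Dict String Int) item =>
      let name := PySem.Str.strip ((PySem.Dict.mk item).getD "name" "")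
      let priority : Int :=
        match (PySem.Dict.mk item).get? "priority" with
        | none => 99
        | some v => if v = "" then 99 else (PySem.Int.ofStr? v).getD 0
      if name = "" then out
      else if out.contains name = false ∨ priority < out.getD name 0 then out.insert name priority
      else out)
    PySem.Dict.empty).items

-- ===== PORT B =====
-- first comprehension of Source B: every item normalized to its (name, priority) pair
def pvPairs : List (List (String × String)) → List (String × Int)
  | [] => []
  | item :: rest =>
      (PySem.Str.strip ((PySem.Dict.mk item).getD "name" ""),
        (match (PySem.Dict.mk item).get? "priority" with
         | none => 99
         | some v => if v = "" then 99 else (PySem.Int.ofStr? v).getD 0)) :: pvPairs rest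

-- min(generator) of Source B; the [] arm is unreachable (each name comes from a named pair).
def pvMinList (ps : List Int) : Int :=
  match ps with
  | [] => 0
  | h :: t => t.foldl min h

def link_priority_map_py_alt (links : List (List (String × String))) : List (String × Int) :=
  let pairs := pvPairs links
  let named := pairs.filter (fun q => q.1 != "")
  let order := PySem.List.dedup (named.map (fun q => q.1))
  order.map (fun n => (n, pvMinList ((named.filter (fun q => q.1 == n)).map (fun q => q.2))))

-- ===== PRECONDITION & SPEC =====
-- Pre_ excludes exactly the inputs where Python A raises ValueError: an item whose "priority"
-- value (first match) is a nonempty string that int() cannot parse.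
def Pre_link_priority_map_py (links : List (List (String × String))) : Prop :=
  (links.all (fun item =>
    match (PySem.Dict.mk item).get? "priority" with
    | none => true
    | some v => v == "" || (PySem.Int.ofStr? v).isSome)) = true
instance (links : List (List (String × String))) : Decidable (Pre_link_priority_map_py links) := by unfold Pre_link_priority_map_py; infer_instance

def pvWitness_link_priority_map_py : (List (List (String × String))) :=
  [[("name", " a "), ("priority", "7")], [("name", "a"), ("priority", "2")], [("name", "b")]]

def Spec_link_priority_map_py (links : List (List (String × String))) (out : List (String × Int)) : Prop := out = link_priority_map_py_alt links
instance (links : List (List (String × String))) (out : List (String × Int)) : Decidable (Spec_link_priority_map_py links out) := by unfold Spec_link_priority_map_py; infer_instance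

-- ===== CLAIM (what is proved, stated in full; the proofs are below) =====
def Claim_equal_link_priority_map_py : Prop := ∀ (links : List (List (String × String))), Dom_link_priority_map_py links → Pre_link_priority_map_py links → Spec_link_priority_map_py links (link_priority_map_py links)

-- ===== LEMMAS AND PROOFS =====

-- The normalization both Pythons perform on one item: none = skipped (empty name).
def pvNorm (item : List (String × String)) : Option (String × Int) :=
  let name := PySem.Str.strip ((PySem.Dict.mk item).getD "name" "")
  let priority : Int :=
    match (PySem.Dict.mk item).get? "priority" with
    | none => 99
    | some v => if v = "" then 99 else (PySem.Int.ofStr? v).getD 0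
  if name = "" then none else some (name, priority)

-- A's per-pair step, and its rewrite as an unconditional insert of the running minimum.
def stepA (d : PySem.Dict String Int) (q : String × Int) : PySem.Dict String Int :=
  if d.contains q.1 = false ∨ q.2 < d.getD q.1 0 then d.insert q.1 q.2 else d
def stepM (d : PySem.Dict String Int) (q : String × Int) : PySem.Dict String Int :=
  d.insert q.1 (min (d.getD q.1 q.2) q.2)

def skipFold {α β σ : Type} (g : α → Option β) (f : σ → β → σ) : σ → α → σ :=
  fun s a => match g a with | some b => f s b | none => s

theorem foldl_filterMap_skip {α β σ : Type} (g : α → Option β) (f : σ → β → σ) :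
    ∀ (l : List α) (i : σ),
      l.foldl (skipFold g f) i = (l.filterMap g).foldl f i := by
  intro l
  induction l with
  | nil => intro i; rfl
  | cons a t ih =>
    intro i
    cases h : g a <;> simp [skipFold, h, ih]

theorem insert_getD_self (d : PySem.Dict String Int) (k : String) (x : Int)
    (hnd : d.keys.Nodup) (hc : d.contains k = true) : d.insert k (d.getD k x) = d := by
  apply PySem.Dict.ext
  rw [PySem.Dict.items_insert_of_contains d _ hc]
  have h1 : ∀ p ∈ d.items, (if (p.1 == k) = true then (k, d.getD k x) else p) = p := by
    intro p hp
    obtain ⟨p1, p2⟩ := p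
    by_cases h : p1 = k
    · subst h
      have hval : d.getD p1 x = p2 := PySem.Dict.getD_of_mem_items d hp hnd x
      simp [hval]
    · simp [h]
  calc d.items.map (fun p => if (p.1 == k) = true then (k, d.getD k x) else p)
      = d.items.map id := List.map_congr_left h1
    _ = d.items := List.map_id d.items

theorem stepA_eq_stepM (d : PySem.Dict String Int) (q : String × Int) (hnd : d.keys.Nodup) :
    stepA d q = stepM d q := by
  unfold stepA stepM
  by_cases hc : d.contains q.1 = true
  · rcases Option.isSome_iff_exists.mp (by rw [← PySem.Dict.contains_eq_isSome_get? d q.1]; exact hc)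
      with ⟨v, hv⟩
    rw [PySem.Dict.getD_of_get?_eq_some d 0 hv, PySem.Dict.getD_of_get?_eq_some d q.2 hv]
    by_cases hlt : q.2 < v
    · simp [hc, hlt, min_eq_right (le_of_lt hlt)]
    · have hmin : min v q.2 = v := min_eq_left (by omega)
      rw [hmin]
      rw [if_neg (by simp [hc, hlt])]
      have h2 := insert_getD_self d q.1 q.2 hnd hc
      rw [PySem.Dict.getD_of_get?_eq_some d q.2 hv] at h2
      exact h2.symm
  · have hc' : d.contains q.1 = false := by simpa using hc
    rw [PySem.Dict.getD_of_not_contains d q.2 hc']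
    simp [hc']

theorem foldl_stepA_eq_stepM : ∀ (l : List (String × Int)) (d : PySem.Dict String Int),
    d.keys.Nodup → l.foldl stepA d = l.foldl stepM d := by
  intro l
  induction l with
  | nil => intro d _; rfl
  | cons q t ih =>
    intro d hnd
    rw [List.foldl_cons, List.foldl_cons, stepA_eq_stepM d q hnd]
    exact ih _ (PySem.Dict.nodup_keys_insert _ _ _ hnd)

theorem get?_foldl_stepM (k : String) : ∀ (l : List (String × Int)) (d : PySem.Dict String Int),
    (l.foldl stepM d).get? k
      = ((l.filter (fun q => q.1 == k)).map (fun x => x.2)).foldl (fun o p => some (min (o.getD p) p)) (d.get? k) := by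
  intro l
  induction l with
  | nil => intro d; rfl
  | cons q t ih =>
    intro d
    rw [List.foldl_cons, ih]
    by_cases h : q.1 = k
    · rw [List.filter_cons_of_pos (by simp [h])]
      simp only [List.map_cons, List.foldl_cons]
      congr 1
      unfold stepM
      subst h
      rw [PySem.Dict.get?_insert_self, PySem.Dict.getD_eq_get?_getD]
    · rw [List.filter_cons_of_neg (by simp [h])]
      congr 1
      unfold stepM
      exact PySem.Dict.get?_insert_of_ne d _ (fun hk => h hk.symm)

theorem optfold_some : ∀ (t : List Int) (v : Int),
    t.foldl (fun o p => some (min (o.getD p) p)) (some v) = some (t.foldl min v) := by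
  intro t
  induction t with
  | nil => intro v; rfl
  | cons p t ih => intro v; simp [ih]

theorem optfold_min (ps : List Int) (h : ps ≠ []) :
    ps.foldl (fun o p => some (min (o.getD p) p)) none = some (pvMinList ps) := by
  match ps with
  | [] => exact absurd rfl h
  | a :: t => simp [pvMinList, optfold_some]

theorem portA_eq_pairs (links : List (List (String × String))) :
    link_priority_map_py links = ((links.filterMap pvNorm).foldl stepA PySem.Dict.empty).items := by
  unfold link_priority_map_py
  have hb : (fun (out : PySem.Dict String Int) (item : List (String × String)) =>
      let name := PySem.Str.strip ((PySem.Dict.mk item).getD "name" "")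
      let priority : Int :=
        match (PySem.Dict.mk item).get? "priority" with
        | none => 99
        | some v => if v = "" then 99 else (PySem.Int.ofStr? v).getD 0
      if name = "" then out
      else if out.contains name = false ∨ priority < out.getD name 0 then out.insert name priority
      else out)
    = skipFold pvNorm stepA := by
    funext out item
    simp only [pvNorm, skipFold]
    by_cases h : PySem.Str.strip ((PySem.Dict.mk item).getD "name" "") = "" <;>
      simp [stepA, h]
  rw [hb, foldl_filterMap_skip]

-- B's filtered pairs list is exactly the skip-normalized stream A consumes.
theorem named_eq_filterMap : ∀ (links : List (List (String × String))),
    (pvPairs links).filter (fun q => q.1 != "") = links.filterMap pvNorm := by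
  intro links
  induction links with
  | nil => rfl
  | cons item rest ih =>
    by_cases h : PySem.Str.strip ((PySem.Dict.mk item).getD "name" "") = ""
    · have hn : pvNorm item = none := by simp [pvNorm, h]
      simp [pvPairs, List.filter_cons, List.filterMap_cons, h, hn, ih]
    · have hn : pvNorm item = some (PySem.Str.strip ((PySem.Dict.mk item).getD "name" ""),
        (match (PySem.Dict.mk item).get? "priority" with
         | none => 99
         | some v => if v = "" then 99 else (PySem.Int.ofStr? v).getD 0)) := by
        simp [pvNorm, h]
      simp [pvPairs, List.filter_cons, List.filterMap_cons, h, hn, ih]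

theorem portB_eq_dedup_map (links : List (List (String × String))) :
    link_priority_map_py_alt links
      = (PySem.Set.ofList ((links.filterMap pvNorm).map (fun q => q.1))).map
          (fun n => (n, pvMinList (((links.filterMap pvNorm).filter (fun q => q.1 == n)).map (fun q => q.2)))) := by
  simp only [link_priority_map_py_alt, named_eq_filterMap, PySem.List.dedup_eq_ofList]

-- ===== VERDICT (by name: the statement is the Claim_ definition above) =====
theorem link_priority_map_py_spec : Claim_equal_link_priority_map_py := by
  intro links _ _
  unfold Spec_link_priority_map_py
  rw [portA_eq_pairs, portB_eq_dedup_map]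
  set P := links.filterMap pvNorm with hP
  -- A side: turn the conditional update into the unconditional running-minimum insert
  rw [foldl_stepA_eq_stepM P PySem.Dict.empty PySem.Dict.nodup_keys_empty]
  set dA := P.foldl stepM PySem.Dict.empty with hdA
  have hndA : dA.keys.Nodup := by
    rw [hdA]; unfold stepM
    exact PySem.Dict.nodup_keys_foldl_insert_key P (fun q => q.1)
      (fun d q => min (d.getD q.1 q.2) q.2) PySem.Dict.empty PySem.Dict.nodup_keys_empty
  have hkA : dA.keys = PySem.Set.update ([] : List String) (P.map (fun q => q.1)) := by
    rw [hdA]; unfold stepM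
    have h := PySem.Dict.keys_foldl_insert_key P (fun q => q.1)
      (fun d q => min (d.getD q.1 q.2) q.2) (PySem.Dict.empty : PySem.Dict String Int)
    rwa [PySem.Dict.keys_empty] at h
  have hset : PySem.Set.ofList (P.map (fun q => q.1))
      = PySem.Set.update ([] : List String) (P.map (fun q => q.1)) := rfl
  rw [PySem.Dict.items_eq_map_keys dA hndA 0, hkA, hset]
  apply List.map_congr_left
  intro k hk
  -- the group of k is nonempty
  have hmem : k ∈ P.map (fun q => q.1) := by
    rcases (PySem.Set.mem_update ([] : List String) (P.map (fun q => q.1)) k).mp hk with h | h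
    · cases h
    · exact h
  rcases List.mem_map.mp hmem with ⟨q, hqP, hq1⟩
  have hps : q.2 ∈ (P.filter (fun q => q.1 == k)).map (fun x => x.2) :=
    List.mem_map.mpr ⟨q, List.mem_filter.mpr ⟨hqP, by simp [hq1]⟩, rfl⟩
  have hne : (P.filter (fun q => q.1 == k)).map (fun x => x.2) ≠ [] :=
    List.ne_nil_of_mem hps
  have hA : dA.getD k 0 = pvMinList ((P.filter (fun q => q.1 == k)).map (fun x => x.2)) := by
    rw [PySem.Dict.getD_eq_get?_getD, hdA, get?_foldl_stepM k P PySem.Dict.empty,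
      PySem.Dict.get?_empty, optfold_min _ hne]
    rfl
  rw [hA]
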